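-- pv_equiv track=rewrite | github.com/fl-sean03/pcp | scripts/task_delegation.py | _infer_subagent
-- ===== SOURCE A (Python) =====
-- from typing import Dict, Any, Optional, List, Union
--
-- def _infer_subagent(description: str) -> Optional[str]:
--     """
--     Infer the best subagent for a task based on its description.
--
--     Returns:
--         Subagent name or None if no specific subagent matches
--     """
--     desc_lower = description.lower()
--
--     # Homework/LaTeX transcription
--     if any(kw in desc_lower for kw in ["homework", "transcribe", "latex", "overleaf", "math"]):
--         return "homework-transcriber"
--
--     # Twitter/social media
--     if any(kw in desc_lower for kw in ["twitter", "tweet", "timeline", "social", "x.com"]):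
--         return "twitter-curator"
--
--     # Research/exploration
--     if any(kw in desc_lower for kw in ["research", "explore", "investigate", "find out", "look into"]):
--         return "research-agent"
--
--     # Overleaf sync
--     if any(kw in desc_lower for kw in ["overleaf sync", "push to overleaf", "pull from overleaf"]):
--         return "overleaf-sync"
--
--     # Default to general worker
--     return "pcp-worker"
-- ===== SOURCE B (Python) =====
-- # Flat keyword -> (priority, subagent) map; exhaustively scan ALL keywords and
-- # keep the minimum-priority match (argmin accumulator) instead of an ordered
-- # short-circuit branch chain. Priorities encode A's branch order exactly.
-- _KEYWORD_RULES = {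
--     "homework": (0, "homework-transcriber"),
--     "transcribe": (0, "homework-transcriber"),
--     "latex": (0, "homework-transcriber"),
--     "overleaf": (0, "homework-transcriber"),
--     "math": (0, "homework-transcriber"),
--     "twitter": (1, "twitter-curator"),
--     "tweet": (1, "twitter-curator"),
--     "timeline": (1, "twitter-curator"),
--     "social": (1, "twitter-curator"),
--     "x.com": (1, "twitter-curator"),
--     "research": (2, "research-agent"),
--     "explore": (2, "research-agent"),
--     "investigate": (2, "research-agent"),
--     "find out": (2, "research-agent"),
--     "look into": (2, "research-agent"),
--     "overleaf sync": (3, "overleaf-sync"),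
--     "push to overleaf": (3, "overleaf-sync"),
--     "pull from overleaf": (3, "overleaf-sync"),
-- }
--
-- def _infer_subagent(description: str):
--     desc_lower = description.lower()
--     best = None
--     for kw, rule in _KEYWORD_RULES.items():
--         if kw in desc_lower and (best is None or rule[0] < best[0]):
--             best = rule
--     return "pcp-worker" if best is None else best[1]
-- ===== Notes on version B (the rewrite author's own statement) =====
-- stated objective: alternative
-- what changed: Replaces the ordered short-circuit chain of grouped if-branches with an exhaustive scan of a flat keyword-to-(priority,name) map keeping the minimum-priority match (argmin accumulator), returning that rule's name.
import Mathlib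
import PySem

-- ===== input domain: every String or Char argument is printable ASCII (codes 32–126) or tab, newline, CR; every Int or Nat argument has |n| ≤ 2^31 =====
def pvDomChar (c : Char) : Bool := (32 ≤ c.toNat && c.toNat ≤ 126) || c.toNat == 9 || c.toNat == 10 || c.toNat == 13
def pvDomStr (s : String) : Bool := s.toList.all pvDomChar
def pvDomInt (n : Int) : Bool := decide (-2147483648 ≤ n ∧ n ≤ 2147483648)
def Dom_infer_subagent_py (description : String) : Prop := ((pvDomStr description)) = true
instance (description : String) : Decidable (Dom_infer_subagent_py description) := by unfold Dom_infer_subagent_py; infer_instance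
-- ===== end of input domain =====

-- B replaces A's ordered short-circuit branch chain by an exhaustive scan of a flat
-- keyword→(priority,name) map keeping the minimum-priority match (alternative; same cost).

-- ===== PORT A =====
-- rendering of Python's `any(kw in desc_lower for kw in kws)`
def anyKw (kws : List String) (d : String) : Bool :=
  kws.any (fun kw => PySem.Str.isIn kw d)

-- literal transliteration of A's chain of if-statements
def infer_subagent_py (description : String) : Option String :=
  let descLower := PySem.Str.lower description
  if anyKw ["homework", "transcribe", "latex", "overleaf", "math"] descLower then
    some "homework-transcriber"
  else if anyKw ["twitter", "tweet", "timeline", "social", "x.com"] descLower then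
    some "twitter-curator"
  else if anyKw ["research", "explore", "investigate", "find out", "look into"] descLower then
    some "research-agent"
  else if anyKw ["overleaf sync", "push to overleaf", "pull from overleaf"] descLower then
    some "overleaf-sync"
  else
    some "pcp-worker"

-- ===== PORT B =====
-- the flat keyword → (priority, subagent) map of Source B, in dict insertion order
def kwTable : List (String × (Nat × String)) :=
  [ ("homework", (0, "homework-transcriber")),
    ("transcribe", (0, "homework-transcriber")),
    ("latex", (0, "homework-transcriber")),
    ("overleaf", (0, "homework-transcriber")),
    ("math", (0, "homework-transcriber")),
    ("twitter", (1, "twitter-curator")),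
    ("tweet", (1, "twitter-curator")),
    ("timeline", (1, "twitter-curator")),
    ("social", (1, "twitter-curator")),
    ("x.com", (1, "twitter-curator")),
    ("research", (2, "research-agent")),
    ("explore", (2, "research-agent")),
    ("investigate", (2, "research-agent")),
    ("find out", (2, "research-agent")),
    ("look into", (2, "research-agent")),
    ("overleaf sync", (3, "overleaf-sync")),
    ("push to overleaf", (3, "overleaf-sync")),
    ("pull from overleaf", (3, "overleaf-sync")) ]

-- one step of Source B's loop: keep the minimum-priority matching rule
def kwStep (d : String) (acc : Option (Nat × String)) (e : String × (Nat × String)) :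
    Option (Nat × String) :=
  if PySem.Str.isIn e.1 d &&
      (match acc with | none => true | some b => decide (e.2.1 < b.1)) then
    some e.2
  else
    acc

-- transliteration of Source B: argmin-priority scan over the whole map, then the name
def infer_subagent_py_alt (description : String) : Option String :=
  let descLower := PySem.Str.lower description
  match kwTable.foldl (kwStep descLower) none with
  | none => some "pcp-worker"
  | some b => some b.2

-- ===== PRECONDITION & SPEC =====
def Spec_infer_subagent_py (description : String) (out : Option String) : Prop := out = infer_subagent_py_alt description
instance (description : String) (out : Option String) : Decidable (Spec_infer_subagent_py description out) := by unfold Spec_infer_subagent_py; infer_instance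

-- ===== CLAIM (what is proved, stated in full; the proofs are below) =====
def Claim_equal_infer_subagent_py : Prop := ∀ (description : String), Dom_infer_subagent_py description → Spec_infer_subagent_py description (infer_subagent_py description)

-- ===== LEMMAS AND PROOFS =====

-- scanning a group whose priority is ≥ the held minimum leaves the accumulator unchanged
theorem foldKeep (d : String) (p q : Nat) (n m : String) (kws : List String) (h : q ≤ p) :
    (kws.map (fun kw => (kw, (p, n)))).foldl (kwStep d) (some (q, m)) = some (q, m) := by
  induction kws with
  | nil => rfl
  | cons k ks ih =>
    have hpq : decide (p < q) = false := decide_eq_false (Nat.not_lt.mpr h)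
    simp [kwStep, hpq, ih]

-- scanning a single-priority group from an empty accumulator is the group's `any`
theorem foldNone (d : String) (p : Nat) (n : String) (kws : List String) :
    (kws.map (fun kw => (kw, (p, n)))).foldl (kwStep d) none =
      if anyKw kws d then some (p, n) else none := by
  induction kws with
  | nil => rfl
  | cons k ks ih =>
    by_cases hk : PySem.Chars.isIn k.toList d.toList = true
    · have hstep : kwStep d none (k, (p, n)) = some (p, n) := by simp [kwStep, hk]
      have hany : anyKw (k :: ks) d = true := by simp [anyKw, PySem.Str.isIn, hk]
      rw [List.map_cons, List.foldl_cons, hstep, if_pos hany]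
      exact foldKeep d p p n n ks le_rfl
    · have hk' : PySem.Chars.isIn k.toList d.toList = false := by simpa using hk
      have hstep : kwStep d none (k, (p, n)) = none := by simp [kwStep, hk']
      have hany : anyKw (k :: ks) d = anyKw ks d := by simp [anyKw, PySem.Str.isIn, hk']
      rw [List.map_cons, List.foldl_cons, hstep, hany, ih]

-- the flat map is the four single-priority groups in order
theorem kwTable_eq :
    kwTable =
      (["homework", "transcribe", "latex", "overleaf", "math"].map
          (fun kw => (kw, (0, "homework-transcriber")))) ++
      (["twitter", "tweet", "timeline", "social", "x.com"].map
          (fun kw => (kw, (1, "twitter-curator")))) ++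
      (["research", "explore", "investigate", "find out", "look into"].map
          (fun kw => (kw, (2, "research-agent")))) ++
      (["overleaf sync", "push to overleaf", "pull from overleaf"].map
          (fun kw => (kw, (3, "overleaf-sync")))) := by
  rfl

-- ===== VERDICT (by name: the statement is the Claim_ definition above) =====
theorem infer_subagent_py_spec : Claim_equal_infer_subagent_py := by
  intro description _
  unfold Spec_infer_subagent_py infer_subagent_py infer_subagent_py_alt
  rw [kwTable_eq]
  simp only [List.foldl_append]
  by_cases h1 : anyKw ["homework", "transcribe", "latex", "overleaf", "math"]
      (PySem.Str.lower description)
  · rw [if_pos h1, foldNone, if_pos h1,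
       foldKeep _ 1 0 _ _ _ (by omega), foldKeep _ 2 0 _ _ _ (by omega),
       foldKeep _ 3 0 _ _ _ (by omega)]
  · rw [if_neg h1, foldNone, if_neg h1]
    by_cases h2 : anyKw ["twitter", "tweet", "timeline", "social", "x.com"]
        (PySem.Str.lower description)
    · rw [if_pos h2, foldNone, if_pos h2,
         foldKeep _ 2 1 _ _ _ (by omega), foldKeep _ 3 1 _ _ _ (by omega)]
    · rw [if_neg h2, foldNone, if_neg h2]
      by_cases h3 : anyKw ["research", "explore", "investigate", "find out", "look into"]
          (PySem.Str.lower description)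
      · rw [if_pos h3, foldNone, if_pos h3, foldKeep _ 3 2 _ _ _ (by omega)]
      · rw [if_neg h3, foldNone, if_neg h3]
        by_cases h4 : anyKw ["overleaf sync", "push to overleaf", "pull from overleaf"]
            (PySem.Str.lower description)
        · rw [if_pos h4, foldNone, if_pos h4]
        · rw [if_neg h4, foldNone, if_neg h4]
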